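-- pv_equiv track=rewrite | github.com/dawnknight/TF | delstatic.py | conti_num
-- ===== SOURCE A (Python) =====
-- def conti_num(array,val = 0,len_th = 1):
--     length = []
--     fnum   = []
--     start = 0
--     cnt = 0
--     for i in range(len(array)):
--         if array[i] == val:
--             cnt += 1
--         else:
--             if cnt >len_th:
--                 length.append(cnt)
--                 fnum.append([start,i-1])
--             start = i+1
--             cnt = 0
--     return fnum,length
-- ===== SOURCE B (Python) =====
-- def conti_num(array, val=0, len_th=1):
--     # delimiter positions: indices whose element differs from val
--     delims = [i for i, x in enumerate(array) if x != val]
--     fnum = []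
--     length = []
--     prev = -1
--     for i in delims:
--         cnt = i - prev - 1
--         if cnt > len_th:
--             length.append(cnt)
--             fnum.append([prev + 1, i - 1])
--         prev = i
--     return fnum, length
-- ===== Notes on version B (the rewrite author's own statement) =====
-- stated objective: alternative
-- what changed: B first collects the delimiter positions (elements != val) in one pass, then derives each run's length and bounds from consecutive delimiter gaps, instead of A's single indexed loop maintaining a running counter and start pointer.
import Mathlib
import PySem

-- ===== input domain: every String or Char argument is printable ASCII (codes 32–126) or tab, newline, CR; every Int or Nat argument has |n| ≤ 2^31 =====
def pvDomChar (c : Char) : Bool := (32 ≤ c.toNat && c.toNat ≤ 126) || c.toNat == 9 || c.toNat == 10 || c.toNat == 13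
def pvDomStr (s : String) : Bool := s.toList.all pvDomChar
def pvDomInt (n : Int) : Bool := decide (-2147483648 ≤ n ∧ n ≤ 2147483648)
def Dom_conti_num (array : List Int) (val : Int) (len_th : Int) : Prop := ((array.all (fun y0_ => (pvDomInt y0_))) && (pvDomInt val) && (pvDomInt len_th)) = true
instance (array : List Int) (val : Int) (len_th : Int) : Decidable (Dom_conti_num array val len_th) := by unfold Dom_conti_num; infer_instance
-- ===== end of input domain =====

-- B collects the delimiter positions first and reads each run off the gaps between
-- consecutive delimiters; same O(n) cost, different decomposition (objective: alternative).

-- ===== PORT A =====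
-- loop body of A: state is (length, fnum, start, cnt)
def conti_num (array : List Int) (val : Int) (len_th : Int) : List (List Int) × List Int :=
  let st := (PySem.List.pyRange 0 (array.length : Int) 1).foldl
    (fun (s : List Int × List (List Int) × Int × Int) (i : Int) =>
      if PySem.List.pyGetD array i 0 = val then (s.1, s.2.1, s.2.2.1, s.2.2.2 + 1)
      else if s.2.2.2 > len_th then (s.1 ++ [s.2.2.2], s.2.1 ++ [[s.2.2.1, i - 1]], i + 1, 0)
      else (s.1, s.2.1, i + 1, 0))
    ([], [], 0, 0)
  (st.2.1, st.1)

-- ===== PORT B =====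
-- loop body of B: state is (fnum, length, prev)
def conti_num_alt (array : List Int) (val : Int) (len_th : Int) : List (List Int) × List Int :=
  let delims := ((PySem.List.enumerate array 0).filter (fun p => p.2 != val)).map (·.1)
  let st := delims.foldl
    (fun (s : List (List Int) × List Int × Int) (i : Int) =>
      let cnt := i - s.2.2 - 1
      if cnt > len_th then (s.1 ++ [[s.2.2 + 1, i - 1]], s.2.1 ++ [cnt], i)
      else (s.1, s.2.1, i))
    ([], [], -1)
  (st.1, st.2.1)

-- ===== PRECONDITION & SPEC =====
def Spec_conti_num (array : List Int) (val : Int) (len_th : Int) (out : List (List Int) × List Int) : Prop := out = conti_num_alt array val len_th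
instance (array : List Int) (val : Int) (len_th : Int) (out : List (List Int) × List Int) : Decidable (Spec_conti_num array val len_th out) := by unfold Spec_conti_num; infer_instance

-- ===== CLAIM (what is proved, stated in full; the proofs are below) =====
def Claim_equal_conti_num : Prop := ∀ (array : List Int) (val : Int) (len_th : Int), Dom_conti_num array val len_th → Spec_conti_num array val len_th (conti_num array val len_th)

-- ===== LEMMAS AND PROOFS =====

-- the two loop bodies, named for the invariant proof
def stepA (val len_th : Int) (s : List Int × List (List Int) × Int × Int) (p : Int × Int) :
    List Int × List (List Int) × Int × Int :=
  if p.2 = val then (s.1, s.2.1, s.2.2.1, s.2.2.2 + 1)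
  else if s.2.2.2 > len_th then (s.1 ++ [s.2.2.2], s.2.1 ++ [[s.2.2.1, p.1 - 1]], p.1 + 1, 0)
  else (s.1, s.2.1, p.1 + 1, 0)

def stepB (len_th : Int) (s : List (List Int) × List Int × Int) (i : Int) :
    List (List Int) × List Int × Int :=
  let cnt := i - s.2.2 - 1
  if cnt > len_th then (s.1 ++ [[s.2.2 + 1, i - 1]], s.2.1 ++ [cnt], i)
  else (s.1, s.2.1, i)

/-- Main loop invariant: A's state (length, fnum, prev+1, s-prev-1) before processing the
suffix enumerated from `s` matches B's state (fnum, length, prev) over the filtered delimiters. -/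
lemma key (val len_th : Int) :
    ∀ (array : List Int) (s prev : Int) (fnum : List (List Int)) (length : List Int),
    (let st := (PySem.List.enumerate array s).foldl (stepA val len_th)
        (length, fnum, prev + 1, s - prev - 1);
      (st.2.1, st.1))
    = (let st := (((PySem.List.enumerate array s).filter (fun p => p.2 != val)).map (·.1)).foldl
        (stepB len_th) (fnum, length, prev);
      (st.1, st.2.1)) := by
  intro array
  induction array with
  | nil => intro s prev fnum length; simp [PySem.List.enumerate_nil]
  | cons x xs ih =>
    intro s prev fnum length
    simp only [PySem.List.enumerate_cons]
    by_cases hx : x = val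
    · have hA : stepA val len_th (length, fnum, prev + 1, s - prev - 1) (s, x)
          = (length, fnum, prev + 1, (s + 1) - prev - 1) := by
        simp [stepA, hx]; omega
      simp only [List.foldl_cons, hA, List.filter_cons]
      have : ((s, x).2 != val) = false := by simp [hx]
      rw [this]
      simpa using ih (s + 1) prev fnum length
    · have hf : ((s, x).2 != val) = true := by simp [hx]
      simp only [List.foldl_cons, List.filter_cons, hf, if_pos, List.map_cons]
      by_cases hc : s - prev - 1 > len_th
      · have hA : stepA val len_th (length, fnum, prev + 1, s - prev - 1) (s, x)
            = (length ++ [s - prev - 1], fnum ++ [[prev + 1, s - 1]], s + 1, (s + 1) - s - 1) := by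
          simp [stepA, hx, hc]
        have hB : stepB len_th (fnum, length, prev) s
            = (fnum ++ [[prev + 1, s - 1]], length ++ [s - prev - 1], s) := by
          simp [stepB, hc]
        rw [hA, hB]
        simpa using ih (s + 1) s (fnum ++ [[prev + 1, s - 1]]) (length ++ [s - prev - 1])
      · have hA : stepA val len_th (length, fnum, prev + 1, s - prev - 1) (s, x)
            = (length, fnum, s + 1, (s + 1) - s - 1) := by
          simp [stepA, hx, hc]
        have hB : stepB len_th (fnum, length, prev) s = (fnum, length, s) := by
          simp [stepB, hc]
        rw [hA, hB]
        simpa using ih (s + 1) s fnum length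

lemma conti_num_eq_enum (array : List Int) (val len_th : Int) :
    conti_num array val len_th
    = (let st := (PySem.List.enumerate array 0).foldl (stepA val len_th) ([], [], 0, 0);
       (st.2.1, st.1)) := by
  unfold conti_num
  rw [PySem.List.enumerate_eq_map_pyRange (d := 0), List.foldl_map]
  rfl

-- ===== VERDICT (by name: the statement is the Claim_ definition above) =====
theorem conti_num_spec : Claim_equal_conti_num := by
  intro array val len_th _
  unfold Spec_conti_num
  rw [conti_num_eq_enum]
  have h := key val len_th array 0 (-1) [] []
  have e1 : (-1 : Int) + 1 = 0 := by norm_num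
  have e2 : (0 : Int) - (-1) - 1 = 0 := by norm_num
  rw [e1, e2] at h
  rw [h]
  rfl
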